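-- pv_equiv track=rewrite | github.com/haiqiang-zhang/Gates-Calculator | gates_calculate.py | word_to_num
-- ===== SOURCE A (Python) =====
-- def word_to_num(A, B, C, infix_list):
--     fixed_list = infix_list.copy()
--     output_tuple = ()
--
--     for index in range(8):
--         temp_list = fixed_list.copy()
--         for index2 in range(len(infix_list)):
--             if fixed_list[index2] == 'A':
--                 temp_list[index2] = str(A[index])
--             if fixed_list[index2] == 'B':
--                 temp_list[index2] = str(B[index])
--             if fixed_list[index2] == 'C':
--                 temp_list[index2] = str(C[index])
--         output_tuple += (temp_list,)
--     return output_tuple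
-- ===== SOURCE B (Python) =====
-- def word_to_num(A, B, C, infix_list):
--     n = len(infix_list)
--     pos_a = [i for i in range(n) if infix_list[i] == 'A']
--     pos_b = [i for i in range(n) if infix_list[i] == 'B']
--     pos_c = [i for i in range(n) if infix_list[i] == 'C']
--     output_tuple = ()
--     for index in range(8):
--         temp = infix_list.copy()
--         if pos_a:
--             v = str(A[index])
--             for i in pos_a:
--                 temp[i] = v
--         if pos_b:
--             v = str(B[index])
--             for i in pos_b:
--                 temp[i] = v
--         if pos_c:
--             v = str(C[index])
--             for i in pos_c:
--                 temp[i] = v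
--         output_tuple += (temp,)
--     return output_tuple
-- ===== Notes on version B (the rewrite author's own statement) =====
-- stated objective: alternative
-- what changed: B scans infix_list once to record the index positions of the 'A'/'B'/'C' tokens and then, for each of the 8 rows, overwrites only those recorded positions in a fresh copy, instead of re-scanning and re-comparing every token of the list on each of the 8 iterations.
import Mathlib
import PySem

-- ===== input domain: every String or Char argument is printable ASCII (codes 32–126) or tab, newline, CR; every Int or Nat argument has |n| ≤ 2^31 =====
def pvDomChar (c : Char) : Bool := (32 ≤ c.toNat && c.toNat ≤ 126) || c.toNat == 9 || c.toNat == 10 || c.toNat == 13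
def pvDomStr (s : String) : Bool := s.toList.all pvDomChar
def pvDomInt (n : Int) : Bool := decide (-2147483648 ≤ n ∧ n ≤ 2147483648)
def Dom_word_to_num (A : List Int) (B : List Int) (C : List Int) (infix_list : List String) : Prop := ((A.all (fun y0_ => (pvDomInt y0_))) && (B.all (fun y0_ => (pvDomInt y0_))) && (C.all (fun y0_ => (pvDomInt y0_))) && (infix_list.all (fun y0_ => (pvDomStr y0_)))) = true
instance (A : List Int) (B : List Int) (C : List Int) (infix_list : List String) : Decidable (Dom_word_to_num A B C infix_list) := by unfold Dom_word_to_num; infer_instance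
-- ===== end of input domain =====

-- B records the positions of the 'A'/'B'/'C' tokens once and overwrites only those positions per row, instead of re-scanning every token on each of the 8 rows (alternative decomposition, same asymptotics).


-- ===== PORT A =====
-- range(8) / range(len(infix_list)) are ported as List.range (all indices are nonnegative, so
-- this is exact); fixed_list[index2] with index2 < len is exact as getD; A[index]/B[index]/C[index]
-- may raise IndexError in Python when the list has fewer than 8 elements — exactly those inputs
-- are excluded by Pre_word_to_num, so the getD default is never the returned value inside Pre_.
def word_to_num (A : List Int) (B : List Int) (C : List Int) (infix_list : List String) : List (List String) :=
  let fixed_list := infix_list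
  (List.range 8).foldl (fun output_tuple index =>
    let temp_list :=
      (List.range infix_list.length).foldl (fun temp_list index2 =>
        let temp_list := if fixed_list.getD index2 "" == "A" then temp_list.set index2 (PySem.Int.toStr (A.getD index 0)) else temp_list
        let temp_list := if fixed_list.getD index2 "" == "B" then temp_list.set index2 (PySem.Int.toStr (B.getD index 0)) else temp_list
        if fixed_list.getD index2 "" == "C" then temp_list.set index2 (PySem.Int.toStr (C.getD index 0)) else temp_list)
        fixed_list
    output_tuple ++ [temp_list]) []

-- ===== PORT B =====
-- same index conventions as port A; the `if pos.isEmpty` guards mirror Source B's `if pos_a:` guards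
-- (in Python they prevent the A[index] access when the token is absent).
def word_to_num_alt (A : List Int) (B : List Int) (C : List Int) (infix_list : List String) : List (List String) :=
  let n := infix_list.length
  let pos_a := (List.range n).filter (fun i => infix_list.getD i "" == "A")
  let pos_b := (List.range n).filter (fun i => infix_list.getD i "" == "B")
  let pos_c := (List.range n).filter (fun i => infix_list.getD i "" == "C")
  (List.range 8).foldl (fun output_tuple index =>
    let temp := infix_list
    let temp := if pos_a.isEmpty then temp else
      pos_a.foldl (fun t i => t.set i (PySem.Int.toStr (A.getD index 0))) temp
    let temp := if pos_b.isEmpty then temp else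
      pos_b.foldl (fun t i => t.set i (PySem.Int.toStr (B.getD index 0))) temp
    let temp := if pos_c.isEmpty then temp else
      pos_c.foldl (fun t i => t.set i (PySem.Int.toStr (C.getD index 0))) temp
    output_tuple ++ [temp]) []

-- ===== PRECONDITION & SPEC =====
-- Pre_ excludes exactly the inputs where Python A raises IndexError: a token 'A'/'B'/'C' present
-- in infix_list while the corresponding value list has fewer than 8 elements.
def Pre_word_to_num (A : List Int) (B : List Int) (C : List Int) (infix_list : List String) : Prop :=
  (("A" : String) ∈ infix_list → 8 ≤ A.length) ∧
  (("B" : String) ∈ infix_list → 8 ≤ B.length) ∧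
  (("C" : String) ∈ infix_list → 8 ≤ C.length)
instance (A : List Int) (B : List Int) (C : List Int) (infix_list : List String) : Decidable (Pre_word_to_num A B C infix_list) := by unfold Pre_word_to_num; infer_instance
def pvWitness_word_to_num : List Int × List Int × List Int × List String :=
  ([0,1,2,3,4,5,6,7], [1,0,1,0,1,0,1,0], [0,0,1,1,0,0,1,1], ["A", "and", "B", "or", "C"])
def Spec_word_to_num (A : List Int) (B : List Int) (C : List Int) (infix_list : List String) (out : List (List String)) : Prop := out = word_to_num_alt A B C infix_list
instance (A : List Int) (B : List Int) (C : List Int) (infix_list : List String) (out : List (List String)) : Decidable (Spec_word_to_num A B C infix_list out) := by unfold Spec_word_to_num; infer_instance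

-- ===== CLAIM (what is proved, stated in full; the proofs are below) =====
def Claim_equal_word_to_num : Prop := ∀ (A : List Int) (B : List Int) (C : List Int) (infix_list : List String), Dom_word_to_num A B C infix_list → Pre_word_to_num A B C infix_list → Spec_word_to_num A B C infix_list (word_to_num A B C infix_list)

-- ===== LEMMAS AND PROOFS =====

theorem pv_setfold_length (v : String) (pos : List Nat) (t : List String) :
    (pos.foldl (fun t i => t.set i v) t).length = t.length := by
  induction pos generalizing t with
  | nil => rfl
  | cons p ps ih => simp [List.foldl_cons, ih]

theorem pv_setfold_getElem? (v : String) (pos : List Nat) (t : List String) (j : Nat) :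
    (pos.foldl (fun t i => t.set i v) t)[j]? =
      if j ∈ pos ∧ j < t.length then some v else t[j]? := by
  induction pos generalizing t with
  | nil => simp
  | cons p ps ih =>
    simp only [List.foldl_cons, ih, List.length_set, List.mem_cons]
    by_cases hm : j ∈ ps
    · by_cases hl : j < t.length
      · simp [hm, hl]
      · simp [hm, hl]
    · by_cases hp : p = j
      · by_cases hl : j < t.length <;>
          simp [hm, hp, hl]
      · simp [hm, List.getElem?_set_ne hp, Ne.symm hp]

theorem pv_foldl_length_inv (step : List String → Nat → List String)
    (h : ∀ t i, (step t i).length = t.length) (L : List Nat) (t : List String) :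
    (L.foldl step t).length = t.length := by
  induction L generalizing t with
  | nil => rfl
  | cons x xs ih => rw [List.foldl_cons, ih, h]

theorem pv_rowA_getElem? (sA sB sC : String) (il : List String) (n : Nat) (j : Nat) :
    ((List.range n).foldl (fun temp i2 =>
        let temp := if il.getD i2 "" == "A" then temp.set i2 sA else temp
        let temp := if il.getD i2 "" == "B" then temp.set i2 sB else temp
        if il.getD i2 "" == "C" then temp.set i2 sC else temp) il)[j]? =
      if j < n ∧ j < il.length then
        some (if il.getD j "" == "A" then sA else if il.getD j "" == "B" then sB
          else if il.getD j "" == "C" then sC else il.getD j "")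
      else il[j]? := by
  have hstep : ∀ (t : List String) (i : Nat), ((fun (temp : List String) (i2 : Nat) =>
        let temp := if il.getD i2 "" == "A" then temp.set i2 sA else temp
        let temp := if il.getD i2 "" == "B" then temp.set i2 sB else temp
        if il.getD i2 "" == "C" then temp.set i2 sC else temp) t i).length = t.length := by
    intro t i; dsimp only; split_ifs <;> simp
  induction n with
  | zero => simp
  | succ n ih =>
    rw [List.range_succ, List.foldl_append]
    set u := (List.range n).foldl (fun temp i2 =>
        let temp := if il.getD i2 "" == "A" then temp.set i2 sA else temp
        let temp := if il.getD i2 "" == "B" then temp.set i2 sB else temp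
        if il.getD i2 "" == "C" then temp.set i2 sC else temp) il with hu
    have hlen : u.length = il.length := pv_foldl_length_inv _ hstep _ _
    have hju' : u[j]? = if j < n ∧ j < il.length then
        some (if il.getD j "" == "A" then sA else if il.getD j "" == "B" then sB
          else if il.getD j "" == "C" then sC else il.getD j "")
      else il[j]? := ih
    clear_value u
    clear hu hstep ih
    simp only [List.foldl_cons, List.foldl_nil]
    by_cases hj : j = n
    · subst hj
      have hju : u[j]? = il[j]? := by rw [hju']; simp
      by_cases hl : j < il.length
      · have hget : il.getD j "" = il[j]'hl := by simp [List.getD, List.getElem?_eq_getElem hl]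
        have hset : ∀ (w : List String) (s : String), w.length = il.length → (w.set j s)[j]? = some s := by
          intro w s hw; simp [hw, hl]
        rw [if_pos (show j < j + 1 ∧ j < il.length from ⟨by omega, hl⟩)]
        split_ifs <;>
          first
            | (rw [hset _ _ (by simp [hlen])]; done)
            | (rw [hju, List.getElem?_eq_getElem hl, hget])
            | (simp only [beq_iff_eq] at *; exfalso; simp_all)
      · simp [hju', hl]
    · have hne : ∀ (w : List String) (s : String), (w.set n s)[j]? = w[j]? :=
        fun w s => List.getElem?_set_ne (fun h => hj h.symm) ..
      have hcond : (j < n + 1 ∧ j < il.length) = (j < n ∧ j < il.length) := by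
        simp only [eq_iff_iff]; constructor <;> intro h <;> exact ⟨by omega, h.2⟩
      refine Eq.trans (b := u[j]?) ?_ ?_
      · split_ifs <;> simp [hne]
      · rw [hju']; simp only [hcond]

def pvRow (sA sB sC : String) (il : List String) : List String :=
  il.map (fun tok => if tok == "A" then sA else if tok == "B" then sB else if tok == "C" then sC else tok)

theorem pv_rowA_eq (sA sB sC : String) (il : List String) :
    ((List.range il.length).foldl (fun temp i2 =>
        let temp := if il.getD i2 "" == "A" then temp.set i2 sA else temp
        let temp := if il.getD i2 "" == "B" then temp.set i2 sB else temp
        if il.getD i2 "" == "C" then temp.set i2 sC else temp) il) = pvRow sA sB sC il := by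
  apply List.ext_getElem?
  intro j
  rw [pv_rowA_getElem?]
  simp only [pvRow, List.getElem?_map]
  by_cases hl : j < il.length
  · have hget : il[j]? = some (il[j]'hl) := List.getElem?_eq_getElem hl
    have hgd : il.getD j "" = il[j]'hl := by simp [List.getD, hget]
    simp [hl]
  · simp [hl]

theorem pv_guard_fold (v : String) (pos : List Nat) (t : List String) :
    (if pos.isEmpty then t else pos.foldl (fun t i => t.set i v) t) =
      pos.foldl (fun t i => t.set i v) t := by
  cases pos <;> simp

theorem pv_rowB_eq (sA sB sC : String) (il : List String) :
    ((List.range il.length).filter (fun i => il.getD i "" == "C")).foldl (fun t i => t.set i sC)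
      (((List.range il.length).filter (fun i => il.getD i "" == "B")).foldl (fun t i => t.set i sB)
        (((List.range il.length).filter (fun i => il.getD i "" == "A")).foldl (fun t i => t.set i sA) il))
      = pvRow sA sB sC il := by
  apply List.ext_getElem?
  intro j
  simp only [pv_setfold_getElem?, pv_setfold_length, List.mem_filter, List.mem_range]
  by_cases hl : j < il.length
  · have hget : il[j]? = some (il[j]'hl) := List.getElem?_eq_getElem hl
    have hgd : il.getD j "" = il[j]'hl := by simp [List.getD, hget]
    simp only [pvRow, List.getElem?_map, hget, Option.map_some]
    by_cases hA : il[j]'hl = "A" <;> by_cases hB : il[j]'hl = "B" <;> by_cases hC : il[j]'hl = "C" <;>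
      simp_all
  · simp [pvRow, hl]

theorem pv_foldl_push (f : Nat → List String) (L : List Nat) (acc : List (List String)) :
    L.foldl (fun acc i => acc ++ [f i]) acc = acc ++ L.map f := by
  induction L generalizing acc with
  | nil => simp
  | cons x xs ih => simp [ih]

-- ===== VERDICT (by name: the statement is the Claim_ definition above) =====
theorem word_to_num_spec : Claim_equal_word_to_num := by
  intro A B C il _ _
  unfold Spec_word_to_num word_to_num word_to_num_alt
  simp only [pv_foldl_push, List.nil_append, pv_guard_fold]
  apply List.map_congr_left
  intro index _
  rw [pv_rowA_eq, pv_rowB_eq]
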